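-- pv_equiv track=rewrite | github.com/darkli/Maestro | src/maestro/state.py | _extract_error_section
-- ===== SOURCE A (Python) =====
-- def _extract_error_section(output: str) -> str:
--     """
--     从输出中提取错误相关的部分
--
--     策略：取包含 error/failed/exception/traceback/错误 等关键词的行，
--     最多取最后 10 行错误行，避免提取结果过长。
--     """
--     if not output:
--         return ""
--     error_lines = []
--     for line in output.split("\n"):
--         if any(kw in line.lower() for kw in
--                ["error", "错误", "failed", "exception", "traceback"]):
--             error_lines.append(line)
--     return "\n".join(error_lines[-10:])
-- ===== SOURCE B (Python) =====
-- def _extract_error_section(output: str) -> str: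
--     if not output:
--         return ""
--     keywords = ["error", "错误", "failed", "exception", "traceback"]
--     buf = []
--     for line in reversed(output.split("\n")):
--         if any(kw in line.lower() for kw in keywords):
--             buf.append(line)
--             if len(buf) == 10:
--                 break
--     buf.reverse()
--     return "\n".join(buf)
-- ===== Notes on version B (the rewrite author's own statement) =====
-- stated objective: alternative
-- what changed: B walks the split lines in reverse with an early break once 10 matching lines are buffered, then reverses the buffer, instead of filtering all lines forward and slicing the last 10.
import Mathlib
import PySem

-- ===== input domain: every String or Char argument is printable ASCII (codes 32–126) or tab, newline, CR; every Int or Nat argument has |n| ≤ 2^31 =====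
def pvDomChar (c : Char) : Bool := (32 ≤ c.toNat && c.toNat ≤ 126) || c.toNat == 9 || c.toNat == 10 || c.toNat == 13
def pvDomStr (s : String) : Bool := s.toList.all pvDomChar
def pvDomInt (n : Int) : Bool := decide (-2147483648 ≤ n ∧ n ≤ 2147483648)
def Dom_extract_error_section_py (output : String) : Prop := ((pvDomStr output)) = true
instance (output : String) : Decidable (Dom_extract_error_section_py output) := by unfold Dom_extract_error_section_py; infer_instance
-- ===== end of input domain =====

-- B walks the lines in reverse with an early break after 10 matches instead of filtering all lines and slicing the last 10; same return value, no speed claim.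

-- the per-line keyword test, identical in both Pythons ('any(kw in line.lower() for kw in [...])')
def pvErrLine (line : String) : Bool :=
  (["error", "错误", "failed", "exception", "traceback"]).any
    (fun kw => PySem.Str.isIn kw (PySem.Str.lower line))

-- ===== PORT A =====
def extract_error_section_py (output : String) : String :=
  if output = "" then ""
  else
    let error_lines := ((PySem.Str.split? output "\n").getD []).foldl
      (fun acc line => if pvErrLine line then acc ++ [line] else acc) []
    PySem.Str.join "\n" (PySem.List.slice error_lines (some (-10)) none)

-- ===== PORT B =====
-- reverse scan: append matching lines to buf, stop as soon as buf holds 10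
def pvCollect : List String → List String → List String
  | [], buf => buf
  | line :: rest, buf =>
    if pvErrLine line then
      let buf' := buf ++ [line]
      if buf'.length = 10 then buf' else pvCollect rest buf'
    else pvCollect rest buf

def extract_error_section_py_alt (output : String) : String :=
  if output = "" then ""
  else
    PySem.Str.join "\n" (pvCollect ((PySem.Str.split? output "\n").getD []).reverse []).reverse

-- ===== PRECONDITION & SPEC =====
def Spec_extract_error_section_py (output : String) (out : String) : Prop := out = extract_error_section_py_alt output
instance (output : String) (out : String) : Decidable (Spec_extract_error_section_py output out) := by unfold Spec_extract_error_section_py; infer_instance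

-- ===== CLAIM (what is proved, stated in full; the proofs are below) =====
def Claim_equal_extract_error_section_py : Prop := ∀ (output : String), Dom_extract_error_section_py output → Spec_extract_error_section_py output (extract_error_section_py output)

-- ===== LEMMAS AND PROOFS =====

-- loop invariant of B's reverse scan: with fewer than 10 lines buffered it collects
-- the next matching lines up to the cap
theorem pvCollect_eq (ls : List String) : ∀ (buf : List String), buf.length < 10 →
    pvCollect ls buf = buf ++ (ls.filter pvErrLine).take (10 - buf.length) := by
  induction ls with
  | nil => intro buf _; simp [pvCollect]
  | cons line rest ih =>
    intro buf hb
    by_cases h : pvErrLine line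
    · simp only [pvCollect, h, if_pos, List.filter_cons]
      by_cases h10 : (buf ++ [line]).length = 10
      · have : 10 - buf.length = 1 := by simp at h10; omega
        simp [h10, this]
      · have hlt : (buf ++ [line]).length < 10 := by simp at h10 ⊢; omega
        rw [if_neg h10, ih _ hlt]
        have : 10 - buf.length = (10 - (buf ++ [line]).length) + 1 := by simp; omega
        simp [this, List.take_succ_cons]
    · simp only [pvCollect, h, List.filter_cons]
      rw [ih _ hb]
      simp

theorem extract_error_section_py_eq_alt (output : String) :
    extract_error_section_py output = extract_error_section_py_alt output := by
  unfold extract_error_section_py extract_error_section_py_alt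
  by_cases h : output = ""
  · simp [h]
  · rw [if_neg h, if_neg h]
    simp only [PySem.List.foldl_append_if_eq_filter, List.nil_append,
      pvCollect_eq _ [] (by simp), List.filter_reverse, List.take_reverse,
      PySem.List.slice_from_neg_ofNat _ 10 (by omega), List.reverse_reverse]
    simp

-- ===== VERDICT (by name: the statement is the Claim_ definition above) =====
theorem extract_error_section_py_spec : Claim_equal_extract_error_section_py := by
  intro output _
  unfold Spec_extract_error_section_py
  exact extract_error_section_py_eq_alt output
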